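-- pv_equiv track=rewrite | github.com/PiotrSzeliga/pp1 | 06-Arrays/Exercise50.py | f
-- ===== SOURCE A (Python) =====
-- def f(array):
--     maximum = 0
--     minimum = 0
--     maximum_location = []
--     minimum_location = []
--     for i in range(0,len(array)):
--         for b in range(0,len(array[i])):
--             if array[i][b] > maximum:
--                 maximum = array[i][b]
--                 maximum_location = [i,b]
--             elif array[i][b] < minimum:
--                 minimum = array[i][b]
--                 minimum_location = [i,b]
--             else:
--                 pass
--     x = f"maximum={maximum} array[{maximum_location[0]}][{maximum_location[1]}]\nminimum={minimum} array[{minimum_location[0]}][{minimum_location[1]}]"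
--     return x
-- ===== SOURCE B (Python) =====
-- def f(array):
--     cells = [(i, b, v) for i, row in enumerate(array) for b, v in enumerate(row)]
--     values = [v for _, _, v in cells]
--     mx = max(values)
--     mn = min(values)
--     mi, mb, _ = next(c for c in cells if c[2] == mx)
--     ni, nb, _ = next(c for c in cells if c[2] == mn)
--     return f"maximum={mx} array[{mi}][{mb}]\nminimum={mn} array[{ni}][{nb}]"
-- ===== Notes on version B (the rewrite author's own statement) =====
-- stated objective: alternative
-- what changed: Replaces the interleaved running-extrema scan (mutable maximum/minimum with strict-update locations) by a compute-then-locate decomposition: flatten the 2D array into coordinate-tagged cells once, take max/min of the values, and find the first cell carrying each extreme.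
-- crash fix: On nonempty arrays with no positive element (or no negative element) A raises IndexError (it indexes the still-empty location list); B returns the true max/min of the array with its first location. — e.g. on f([[1, 2]]): A raises IndexError, B returns "maximum=2 array[0][1]\nminimum=1 array[0][0]"
import Mathlib
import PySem

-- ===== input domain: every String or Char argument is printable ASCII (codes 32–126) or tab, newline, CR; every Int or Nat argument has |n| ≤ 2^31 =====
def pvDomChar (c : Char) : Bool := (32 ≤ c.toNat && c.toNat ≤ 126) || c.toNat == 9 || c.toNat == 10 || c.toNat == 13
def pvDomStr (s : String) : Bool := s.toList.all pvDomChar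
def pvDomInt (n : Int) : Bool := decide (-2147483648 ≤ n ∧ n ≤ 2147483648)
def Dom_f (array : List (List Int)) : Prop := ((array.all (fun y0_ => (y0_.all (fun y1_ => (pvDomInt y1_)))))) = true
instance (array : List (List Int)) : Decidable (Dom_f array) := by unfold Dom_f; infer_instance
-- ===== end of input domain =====

-- B replaces A's interleaved running-extrema scan by a flatten / max-min / first-locate
-- decomposition (objective: alternative, same cost); A and B agree on the return value on Pre_f.

-- ===== PORT A =====
-- state s = (maximum, minimum, maximum_location, minimum_location)
def f (array : List (List Int)) : String :=
  let st :=
    (PySem.List.pyRange 0 array.length 1).foldl (fun s i =>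
      let row := PySem.List.pyGetD array i []
      (PySem.List.pyRange 0 row.length 1).foldl (fun s b =>
        let v := PySem.List.pyGetD row b 0
        if v > s.1 then (v, s.2.1, ([i, b] : List Int), s.2.2.2)
        else if v < s.2.1 then (s.1, v, s.2.2.1, ([i, b] : List Int))
        else s) s)
      ((0 : Int), (0 : Int), ([] : List Int), ([] : List Int))
  -- the f-string; location[0]/location[1] raise IndexError on an empty location list,
  -- totalised with default 0 (Pre_f excludes exactly those inputs)
  "maximum=" ++ PySem.Int.toStr st.1
    ++ " array[" ++ PySem.Int.toStr (PySem.List.pyGetD st.2.2.1 0 0)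
    ++ "][" ++ PySem.Int.toStr (PySem.List.pyGetD st.2.2.1 1 0)
    ++ "]\nminimum=" ++ PySem.Int.toStr st.2.1
    ++ " array[" ++ PySem.Int.toStr (PySem.List.pyGetD st.2.2.2 0 0)
    ++ "][" ++ PySem.Int.toStr (PySem.List.pyGetD st.2.2.2 1 0) ++ "]"

-- ===== PORT B =====
-- the coordinate-tagged flattening [(i, b, v) for i, row in enumerate(array) for b, v in enumerate(row)]
def cellsOf (array : List (List Int)) : List (Int × Int × Int) :=
  (PySem.List.enumerate array 0).flatMap (fun p =>
    (PySem.List.enumerate p.2 0).map (fun q => (p.1, q.1, q.2)))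

def f_alt (array : List (List Int)) : String :=
  let cells := cellsOf array
  let values := cells.map (fun c => c.2.2)
  -- max(values)/min(values); Python raises ValueError on empty, totalised with default 0 (outside Pre_f)
  let mx := (PySem.List.max? values (fun y => y)).getD 0
  let mn := (PySem.List.min? values (fun y => y)).getD 0
  -- next(c for c in cells if c[2] == mx); never fails once max?/min? succeeded
  let cmax := (cells.find? (fun c => c.2.2 == mx)).getD (0, 0, 0)
  let cmin := (cells.find? (fun c => c.2.2 == mn)).getD (0, 0, 0)
  "maximum=" ++ PySem.Int.toStr mx
    ++ " array[" ++ PySem.Int.toStr cmax.1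
    ++ "][" ++ PySem.Int.toStr cmax.2.1
    ++ "]\nminimum=" ++ PySem.Int.toStr mn
    ++ " array[" ++ PySem.Int.toStr cmin.1
    ++ "][" ++ PySem.Int.toStr cmin.2.1 ++ "]"

-- ===== PRECONDITION & SPEC =====
-- Pre_f = exactly the inputs where A returns: A indexes maximum_location[0] / minimum_location[0],
-- which are nonempty iff some element is > 0 resp. some element is < 0 (else Python raises IndexError).
def Pre_f (array : List (List Int)) : Prop :=
  (∃ r ∈ array, ∃ v ∈ r, 0 < v) ∧ (∃ r ∈ array, ∃ v ∈ r, v < 0)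
instance (array : List (List Int)) : Decidable (Pre_f array) := by unfold Pre_f; infer_instance

def pvWitness_f : List (List Int) := [[3, -2], [5]]

-- On nonempty arrays with no positive element (or no negative element) A raises IndexError;
-- B returns the true max/min of the array with its first location.
def Raises_f (array : List (List Int)) : Prop :=
  (∃ r ∈ array, r ≠ []) ∧ (¬ (∃ r ∈ array, ∃ v ∈ r, 0 < v) ∨ ¬ (∃ r ∈ array, ∃ v ∈ r, v < 0))
instance (array : List (List Int)) : Decidable (Raises_f array) := by unfold Raises_f; infer_instance

def pvRaiseWitness_f : List (List Int) := [[1, 2]]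
def pvRaiseWitnessOut_f : String := "maximum=2 array[0][1]\nminimum=1 array[0][0]"

def Spec_f (array : List (List Int)) (out : String) : Prop := out = f_alt array
instance (array : List (List Int)) (out : String) : Decidable (Spec_f array out) := by unfold Spec_f; infer_instance

-- ===== CLAIM (what is proved, stated in full; the proofs are below) =====
def Claim_equal_f : Prop := ∀ (array : List (List Int)), Dom_f array → Pre_f array → Spec_f array (f array)
def Claim_raises_f : Prop := (∀ (array : List (List Int)), Dom_f array → Raises_f array → ¬ Pre_f array) ∧ (Dom_f (pvRaiseWitness_f) ∧ Raises_f (pvRaiseWitness_f) ∧ f_alt (pvRaiseWitness_f) = pvRaiseWitnessOut_f)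

-- ===== LEMMAS AND PROOFS =====

theorem foldl_idx_aux {α β : Type} (g : β → Int → α → β) (d : α) :
    ∀ (m : Nat) (full : List α) (k : Nat) (init : β), full.length - k ≤ m →
    (PySem.List.pyRange (k : Int) (full.length : Int) 1).foldl
        (fun acc j => g acc j (PySem.List.pyGetD full j d)) init
      = (PySem.List.enumerate (full.drop k) (k : Int)).foldl (fun acc q => g acc q.1 q.2) init := by
  intro m
  induction m with
  | zero =>
    intro full k init h
    have hk : full.length ≤ k := by omega
    rw [PySem.List.pyRange_one_eq_nil (by exact_mod_cast hk), List.drop_eq_nil_of_le hk]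
    simp [PySem.List.enumerate]
  | succ m ih =>
    intro full k init h
    by_cases hk : full.length ≤ k
    · rw [PySem.List.pyRange_one_eq_nil (by exact_mod_cast hk), List.drop_eq_nil_of_le hk]
      simp [PySem.List.enumerate]
    · push_neg at hk
      rw [PySem.List.pyRange_one_cons (by exact_mod_cast hk)]
      have hdrop : full.drop k = full[k] :: full.drop (k + 1) := List.drop_eq_getElem_cons hk
      rw [hdrop, PySem.List.enumerate_cons]
      simp only [List.foldl_cons]
      have hget : PySem.List.pyGetD full (k : Int) d = full[k] := by
        rw [PySem.List.pyGetD_natCast]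
        exact List.getD_eq_getElem full d hk
      rw [hget]
      have := ih full (k + 1) (g init (k : Int) full[k]) (by omega)
      push_cast at this ⊢
      exact this

theorem foldl_idx {α β : Type} (g : β → Int → α → β) (d : α) (xs : List α) (init : β) :
    (PySem.List.pyRange 0 (xs.length : Int) 1).foldl
        (fun acc j => g acc j (PySem.List.pyGetD xs j d)) init
      = (PySem.List.enumerate xs 0).foldl (fun acc q => g acc q.1 q.2) init := by
  have := foldl_idx_aux g d xs.length xs 0 init (by omega)
  simpa using this

def stepA (s : Int × Int × List Int × List Int) (c : Int × Int × Int) :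
    Int × Int × List Int × List Int :=
  if c.2.2 > s.1 then (c.2.2, s.2.1, [c.1, c.2.1], s.2.2.2)
  else if c.2.2 < s.2.1 then (s.1, c.2.2, s.2.2.1, [c.1, c.2.1])
  else s

def maxStep (p : Int × List Int) (c : Int × Int × Int) : Int × List Int :=
  if c.2.2 > p.1 then (c.2.2, [c.1, c.2.1]) else p

def minStep (p : Int × List Int) (c : Int × Int × Int) : Int × List Int :=
  if c.2.2 < p.1 then (c.2.2, [c.1, c.2.1]) else p

def maxVal (l : List (Int × Int × Int)) (a : Int) : Int := l.foldl (fun a c => max a c.2.2) a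

def minVal (l : List (Int × Int × Int)) (a : Int) : Int := l.foldl (fun a c => min a c.2.2) a

theorem split_fold : ∀ (l : List (Int × Int × Int)) (mx mn : Int) (ml nl : List Int), mn ≤ mx →
    l.foldl stepA (mx, mn, ml, nl)
      = ((l.foldl maxStep (mx, ml)).1, (l.foldl minStep (mn, nl)).1,
         (l.foldl maxStep (mx, ml)).2, (l.foldl minStep (mn, nl)).2) := by
  intro l
  induction l with
  | nil => intro mx mn ml nl h; simp
  | cons c t ih =>
    intro mx mn ml nl h
    simp only [List.foldl_cons]
    by_cases h1 : c.2.2 > mx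
    · have h2 : ¬ c.2.2 < mn := by omega
      simp only [stepA, maxStep, minStep, if_pos h1, if_neg h2]
      exact ih c.2.2 mn [c.1, c.2.1] nl (by omega)
    · by_cases h2 : c.2.2 < mn
      · simp only [stepA, maxStep, minStep, if_neg h1, if_pos h2]
        exact ih mx c.2.2 ml [c.1, c.2.1] (by omega)
      · simp only [stepA, maxStep, minStep, if_neg h1, if_neg h2]
        exact ih mx mn ml nl h

theorem le_maxVal : ∀ (l : List (Int × Int × Int)) (a : Int), a ≤ maxVal l a := by
  intro l
  induction l with
  | nil => intro a; simp [maxVal]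
  | cons c t ih =>
    intro a
    calc a ≤ max a c.2.2 := le_max_left _ _
      _ ≤ maxVal t (max a c.2.2) := ih _
      _ = maxVal (c :: t) a := rfl

theorem minVal_le : ∀ (l : List (Int × Int × Int)) (a : Int), minVal l a ≤ a := by
  intro l
  induction l with
  | nil => intro a; simp [minVal]
  | cons c t ih =>
    intro a
    calc minVal (c :: t) a = minVal t (min a c.2.2) := rfl
      _ ≤ min a c.2.2 := ih _
      _ ≤ a := min_le_left _ _

theorem mem_le_maxVal : ∀ (l : List (Int × Int × Int)) (a : Int) (c : Int × Int × Int),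
    c ∈ l → c.2.2 ≤ maxVal l a := by
  intro l
  induction l with
  | nil => intro a c hc; cases hc
  | cons x t ih =>
    intro a c hc
    rcases List.mem_cons.mp hc with h | h
    · subst h
      calc c.2.2 ≤ max a c.2.2 := le_max_right _ _
        _ ≤ maxVal t (max a c.2.2) := le_maxVal _ _
    · exact ih _ c h

theorem minVal_le_mem : ∀ (l : List (Int × Int × Int)) (a : Int) (c : Int × Int × Int),
    c ∈ l → minVal l a ≤ c.2.2 := by
  intro l
  induction l with
  | nil => intro a c hc; cases hc
  | cons x t ih =>
    intro a c hc
    rcases List.mem_cons.mp hc with h | h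
    · subst h
      calc minVal t (min a c.2.2) ≤ min a c.2.2 := minVal_le _ _
        _ ≤ c.2.2 := min_le_right _ _
    · exact ih _ c h

theorem maxStep_noupdate : ∀ (l : List (Int × Int × Int)) (mx : Int) (ml : List Int),
    (∀ c ∈ l, c.2.2 ≤ mx) → l.foldl maxStep (mx, ml) = (mx, ml) := by
  intro l
  induction l with
  | nil => intro mx ml h; simp
  | cons c t ih =>
    intro mx ml h
    have hc : ¬ c.2.2 > mx := by have := h c (by simp); omega
    simp only [List.foldl_cons, maxStep, if_neg hc]
    exact ih mx ml (fun x hx => h x (by simp [hx]))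

theorem minStep_noupdate : ∀ (l : List (Int × Int × Int)) (mn : Int) (nl : List Int),
    (∀ c ∈ l, mn ≤ c.2.2) → l.foldl minStep (mn, nl) = (mn, nl) := by
  intro l
  induction l with
  | nil => intro mn nl h; simp
  | cons c t ih =>
    intro mn nl h
    have hc : ¬ c.2.2 < mn := by have := h c (by simp); omega
    simp only [List.foldl_cons, minStep, if_neg hc]
    exact ih mn nl (fun x hx => h x (by simp [hx]))

theorem maxChar : ∀ (l : List (Int × Int × Int)) (mx : Int) (ml : List Int), mx < maxVal l mx →
    ∃ c₀, l.find? (fun c => decide (maxVal l mx ≤ c.2.2)) = some c₀ ∧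
      l.foldl maxStep (mx, ml) = (maxVal l mx, [c₀.1, c₀.2.1]) := by
  intro l
  induction l with
  | nil => intro mx ml h; simp [maxVal] at h
  | cons c t ih =>
    intro mx ml h
    have hM : maxVal (c :: t) mx = maxVal t (max mx c.2.2) := rfl
    by_cases h1 : c.2.2 > mx
    · have hmax : max mx c.2.2 = c.2.2 := by omega
      have hle : c.2.2 ≤ maxVal t c.2.2 := le_maxVal _ _
      by_cases h2 : c.2.2 < maxVal t c.2.2
      · obtain ⟨c₀, hfind, hfold⟩ := ih c.2.2 [c.1, c.2.1] h2
        refine ⟨c₀, ?_, ?_⟩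
        · rw [List.find?_cons_of_neg, hM, hmax]
          · exact hfind
          · rw [hM, hmax]; simp only [decide_eq_true_eq]; omega
        · simp only [List.foldl_cons, maxStep, if_pos h1]
          rw [hM, hmax]; exact hfold
      · have heq : maxVal t c.2.2 = c.2.2 := by omega
        refine ⟨c, ?_, ?_⟩
        · rw [List.find?_cons_of_pos]
          rw [hM, hmax, heq]; simp
        · simp only [List.foldl_cons, maxStep, if_pos h1]
          rw [maxStep_noupdate t c.2.2 [c.1, c.2.1]
            (fun x hx => heq ▸ mem_le_maxVal t c.2.2 x hx), hM, hmax, heq]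
    · have hmax : max mx c.2.2 = mx := by omega
      have h' : mx < maxVal t mx := by rw [hM, hmax] at h; exact h
      obtain ⟨c₀, hfind, hfold⟩ := ih mx ml h'
      refine ⟨c₀, ?_, ?_⟩
      · rw [List.find?_cons_of_neg, hM, hmax]
        · exact hfind
        · rw [hM, hmax]; simp only [decide_eq_true_eq]; omega
      · simp only [List.foldl_cons, maxStep, if_neg h1]
        rw [hM, hmax]; exact hfold

theorem minChar : ∀ (l : List (Int × Int × Int)) (mn : Int) (nl : List Int), minVal l mn < mn →
    ∃ c₀, l.find? (fun c => decide (c.2.2 ≤ minVal l mn)) = some c₀ ∧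
      l.foldl minStep (mn, nl) = (minVal l mn, [c₀.1, c₀.2.1]) := by
  intro l
  induction l with
  | nil => intro mn nl h; simp [minVal] at h
  | cons c t ih =>
    intro mn nl h
    have hM : minVal (c :: t) mn = minVal t (min mn c.2.2) := rfl
    by_cases h1 : c.2.2 < mn
    · have hmin : min mn c.2.2 = c.2.2 := by omega
      have hle : minVal t c.2.2 ≤ c.2.2 := minVal_le _ _
      by_cases h2 : minVal t c.2.2 < c.2.2
      · obtain ⟨c₀, hfind, hfold⟩ := ih c.2.2 [c.1, c.2.1] h2
        refine ⟨c₀, ?_, ?_⟩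
        · rw [List.find?_cons_of_neg, hM, hmin]
          · exact hfind
          · rw [hM, hmin]; simp only [decide_eq_true_eq]; omega
        · simp only [List.foldl_cons, minStep, if_pos h1]
          rw [hM, hmin]; exact hfold
      · have heq : minVal t c.2.2 = c.2.2 := by omega
        refine ⟨c, ?_, ?_⟩
        · rw [List.find?_cons_of_pos]
          rw [hM, hmin, heq]; simp
        · simp only [List.foldl_cons, minStep, if_pos h1]
          rw [minStep_noupdate t c.2.2 [c.1, c.2.1]
            (fun x hx => heq ▸ minVal_le_mem t c.2.2 x hx), hM, hmin, heq]
    · have hmin : min mn c.2.2 = mn := by omega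
      have h' : minVal t mn < mn := by rw [hM, hmin] at h; exact h
      obtain ⟨c₀, hfind, hfold⟩ := ih mn nl h'
      refine ⟨c₀, ?_, ?_⟩
      · rw [List.find?_cons_of_neg, hM, hmin]
        · exact hfind
        · rw [hM, hmin]; simp only [decide_eq_true_eq]; omega
      · simp only [List.foldl_cons, minStep, if_neg h1]
        rw [hM, hmin]; exact hfold

theorem fold_max_comm : ∀ (vs : List Int) (a b : Int),
    vs.foldl max (max a b) = max a (vs.foldl max b) := by
  intro vs
  induction vs with
  | nil => intro a b; simp
  | cons v t ih =>
    intro a b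
    simp only [List.foldl_cons, max_assoc, ih]

theorem fold_min_comm : ∀ (vs : List Int) (a b : Int),
    vs.foldl min (min a b) = min a (vs.foldl min b) := by
  intro vs
  induction vs with
  | nil => intro a b; simp
  | cons v t ih =>
    intro a b
    simp only [List.foldl_cons, min_assoc, ih]

theorem maxVal_map : ∀ (l : List (Int × Int × Int)) (a : Int),
    maxVal l a = (l.map (fun c => c.2.2)).foldl max a := by
  intro l
  induction l with
  | nil => intro a; rfl
  | cons c t ih => intro a; simp only [List.map_cons, List.foldl_cons]; exact ih _

theorem minVal_map : ∀ (l : List (Int × Int × Int)) (a : Int),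
    minVal l a = (l.map (fun c => c.2.2)).foldl min a := by
  intro l
  induction l with
  | nil => intro a; rfl
  | cons c t ih => intro a; simp only [List.map_cons, List.foldl_cons]; exact ih _

theorem max?_eq (l : List (Int × Int × Int)) (h : 0 < maxVal l 0) :
    PySem.List.max? (l.map (fun c => c.2.2)) (fun y => y) = some (maxVal l 0) := by
  cases l with
  | nil => simp [maxVal] at h
  | cons c t =>
    rw [List.map_cons, PySem.List.max?_id_cons]
    have hv : maxVal (c :: t) 0 = max 0 ((t.map (fun c => c.2.2)).foldl max c.2.2) := by
      rw [maxVal_map]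
      simp only [List.map_cons, List.foldl_cons]
      exact fold_max_comm _ 0 c.2.2
    have hpos : 0 < (t.map (fun c => c.2.2)).foldl max c.2.2 := by
      rw [hv] at h; omega
    rw [hv, max_eq_right (le_of_lt hpos)]

theorem min?_eq (l : List (Int × Int × Int)) (h : minVal l 0 < 0) :
    PySem.List.min? (l.map (fun c => c.2.2)) (fun y => y) = some (minVal l 0) := by
  cases l with
  | nil => simp [minVal] at h
  | cons c t =>
    rw [List.map_cons, PySem.List.min?_id_cons]
    have hv : minVal (c :: t) 0 = min 0 ((t.map (fun c => c.2.2)).foldl min c.2.2) := by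
      rw [minVal_map]
      simp only [List.map_cons, List.foldl_cons]
      exact fold_min_comm _ 0 c.2.2
    have hneg : (t.map (fun c => c.2.2)).foldl min c.2.2 < 0 := by
      rw [hv] at h; omega
    rw [hv, min_eq_right (le_of_lt hneg)]

theorem find?_ext {α : Type} (p q : α → Bool) :
    ∀ l : List α, (∀ x ∈ l, p x = q x) → l.find? p = l.find? q := by
  intro l
  induction l with
  | nil => intro h; rfl
  | cons x t ih =>
    intro h
    have hx := h x (by simp)
    by_cases hp : p x = true
    · rw [List.find?_cons_of_pos hp, List.find?_cons_of_pos (hx ▸ hp)]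
    · rw [List.find?_cons_of_neg hp, List.find?_cons_of_neg (hx ▸ hp)]
      exact ih (fun y hy => h y (by simp [hy]))

theorem mem_cellsOf (array : List (List Int)) (r : List Int) (v : Int)
    (hr : r ∈ array) (hv : v ∈ r) : ∃ c ∈ cellsOf array, c.2.2 = v := by
  have h1 : r ∈ (PySem.List.enumerate array 0).map (fun p => p.2) := by
    rw [PySem.List.map_snd_enumerate]; exact hr
  obtain ⟨p, hp, hpr⟩ := List.mem_map.mp h1
  have h2 : v ∈ (PySem.List.enumerate p.2 0).map (fun q => q.2) := by
    rw [PySem.List.map_snd_enumerate, hpr]; exact hv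
  obtain ⟨q, hq, hqv⟩ := List.mem_map.mp h2
  exact ⟨(p.1, q.1, q.2), List.mem_flatMap.mpr ⟨p, hp, List.mem_map.mpr ⟨q, hq, rfl⟩⟩, hqv⟩

def renderA (st : Int × Int × List Int × List Int) : String :=
  "maximum=" ++ PySem.Int.toStr st.1
    ++ " array[" ++ PySem.Int.toStr (PySem.List.pyGetD st.2.2.1 0 0)
    ++ "][" ++ PySem.Int.toStr (PySem.List.pyGetD st.2.2.1 1 0)
    ++ "]\nminimum=" ++ PySem.Int.toStr st.2.1
    ++ " array[" ++ PySem.Int.toStr (PySem.List.pyGetD st.2.2.2 0 0)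
    ++ "][" ++ PySem.Int.toStr (PySem.List.pyGetD st.2.2.2 1 0) ++ "]"

theorem loopA_eq (array : List (List Int)) (s0 : Int × Int × List Int × List Int) :
    (PySem.List.pyRange 0 (array.length : Int) 1).foldl (fun s i =>
      (PySem.List.pyRange 0 ((PySem.List.pyGetD array i []).length : Int) 1).foldl (fun s b =>
        stepA s (i, b, PySem.List.pyGetD (PySem.List.pyGetD array i []) b 0)) s) s0
      = (cellsOf array).foldl stepA s0 := by
  rw [foldl_idx (g := fun s i r =>
    (PySem.List.pyRange 0 (r.length : Int) 1).foldl (fun s b =>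
      stepA s (i, b, PySem.List.pyGetD r b 0)) s) [] array s0]
  rw [cellsOf, List.foldl_flatMap]
  apply List.foldl_ext
  intro s p _
  rw [List.foldl_map]
  exact foldl_idx (g := fun s b v => stepA s (p.1, b, v)) 0 p.2 s

theorem main (array : List (List Int))
    (hpos : ∃ r ∈ array, ∃ v ∈ r, 0 < v) (hneg : ∃ r ∈ array, ∃ v ∈ r, v < 0) :
    f array = f_alt array := by
  obtain ⟨rp, hrp, vp, hvp, hvppos⟩ := hpos
  obtain ⟨rn, hrn, vn, hvn, hvnneg⟩ := hneg
  obtain ⟨cp, hcp, hcpv⟩ := mem_cellsOf array rp vp hrp hvp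
  obtain ⟨cn, hcn, hcnv⟩ := mem_cellsOf array rn vn hrn hvn
  have hMpos : 0 < maxVal (cellsOf array) 0 :=
    lt_of_lt_of_le hvppos (hcpv ▸ mem_le_maxVal _ 0 cp hcp)
  have hNneg : minVal (cellsOf array) 0 < 0 :=
    lt_of_le_of_lt (hcnv ▸ minVal_le_mem _ 0 cn hcn) hvnneg
  obtain ⟨cmax, hfindmax, hfoldmax⟩ := maxChar (cellsOf array) 0 [] hMpos
  obtain ⟨cmin, hfindmin, hfoldmin⟩ := minChar (cellsOf array) 0 [] hNneg
  have hmx := max?_eq (cellsOf array) hMpos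
  have hmn := min?_eq (cellsOf array) hNneg
  have hfind2 : (cellsOf array).find? (fun c => c.2.2 == maxVal (cellsOf array) 0) = some cmax := by
    rw [find?_ext _ (fun c => decide (maxVal (cellsOf array) 0 ≤ c.2.2)) _ ?_]
    · exact hfindmax
    · intro x hx
      have h1 := mem_le_maxVal (cellsOf array) 0 x hx
      rw [Bool.eq_iff_iff]
      simp only [beq_iff_eq, decide_eq_true_eq]
      omega
  have hfind3 : (cellsOf array).find? (fun c => c.2.2 == minVal (cellsOf array) 0) = some cmin := by
    rw [find?_ext _ (fun c => decide (c.2.2 ≤ minVal (cellsOf array) 0)) _ ?_]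
    · exact hfindmin
    · intro x hx
      have h1 := minVal_le_mem (cellsOf array) 0 x hx
      rw [Bool.eq_iff_iff]
      simp only [beq_iff_eq, decide_eq_true_eq]
      omega
  have hA : f array = renderA ((PySem.List.pyRange 0 (array.length : Int) 1).foldl (fun s i =>
      (PySem.List.pyRange 0 ((PySem.List.pyGetD array i []).length : Int) 1).foldl (fun s b =>
        stepA s (i, b, PySem.List.pyGetD (PySem.List.pyGetD array i []) b 0)) s)
      ((0 : Int), (0 : Int), ([] : List Int), ([] : List Int))) := rfl
  rw [loopA_eq, split_fold _ 0 0 [] [] le_rfl, hfoldmax, hfoldmin] at hA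
  have hB : f_alt array =
      "maximum=" ++ PySem.Int.toStr ((PySem.List.max? ((cellsOf array).map (fun c => c.2.2)) (fun y => y)).getD 0)
      ++ " array[" ++ PySem.Int.toStr (((cellsOf array).find? (fun c => c.2.2 == (PySem.List.max? ((cellsOf array).map (fun c => c.2.2)) (fun y => y)).getD 0)).getD (0, 0, 0)).1
      ++ "][" ++ PySem.Int.toStr (((cellsOf array).find? (fun c => c.2.2 == (PySem.List.max? ((cellsOf array).map (fun c => c.2.2)) (fun y => y)).getD 0)).getD (0, 0, 0)).2.1
      ++ "]\nminimum=" ++ PySem.Int.toStr ((PySem.List.min? ((cellsOf array).map (fun c => c.2.2)) (fun y => y)).getD 0)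
      ++ " array[" ++ PySem.Int.toStr (((cellsOf array).find? (fun c => c.2.2 == (PySem.List.min? ((cellsOf array).map (fun c => c.2.2)) (fun y => y)).getD 0)).getD (0, 0, 0)).1
      ++ "][" ++ PySem.Int.toStr (((cellsOf array).find? (fun c => c.2.2 == (PySem.List.min? ((cellsOf array).map (fun c => c.2.2)) (fun y => y)).getD 0)).getD (0, 0, 0)).2.1
      ++ "]" := rfl
  rw [hmx, hmn] at hB
  simp only [Option.getD_some] at hB
  rw [hfind2, hfind3] at hB
  simp only [Option.getD_some] at hB
  rw [hA, hB, renderA]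
  simp [PySem.List.pyGetD_zero_cons,
    show ∀ (a b : Int), PySem.List.pyGetD [a, b] 1 0 = b from fun a b => rfl]

-- ===== VERDICT (by name: the statement is the Claim_ definition above) =====
theorem f_spec : Claim_equal_f := by
  intro array _ hpre
  unfold Spec_f
  exact main array hpre.1 hpre.2

@[simp] theorem f_raises : Claim_raises_f := by
  unfold Claim_raises_f
  exact ⟨by intro array _ hr hpre
            rcases hr.2 with h | h
            · exact h hpre.1
            · exact h hpre.2, by decide⟩
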